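-- pv_equiv track=rewrite | github.com/david970218p/proyectoIsom | mlibreria.py | escalarPuntos
-- ===== SOURCE A (Python) =====
-- def escalarPunto(punto,s):
--     xp = punto[0] * s[0]
--     yp = punto[1] * s[1]
--     return [xp,yp]
--
-- def escalarPuntos(puntos, s, puntoFijo = None):
--     if puntoFijo != None:
--         pf = [-1*p for p in puntoFijo]
--         puntos = trasladarPuntos(puntos, pf)
--     ls = [escalarPunto(punto, s) for punto in puntos]
--     if puntoFijo != None:
--         ls = trasladarPuntos(ls, puntoFijo)
--     return ls
--
-- def trasladarPunto(punto, t):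
--     xp = punto[0] + t[0]
--     yp = punto[1] + t[1]
--     return [xp,yp]
--
-- def trasladarPuntos(puntos, t):
--     return [trasladarPunto(punto,t) for punto in puntos]
-- ===== SOURCE B (Python) =====
-- def escalarPuntos(puntos, s, puntoFijo = None):
--     if puntoFijo is None:
--         return [[p[0]*s[0], p[1]*s[1]] for p in puntos]
--     return [[(p[0] + (-1*puntoFijo[0]))*s[0] + puntoFijo[0],
--              (p[1] + (-1*puntoFijo[1]))*s[1] + puntoFijo[1]] for p in puntos]
-- ===== Notes on version B (the rewrite author's own statement) =====
-- stated objective: simpler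
-- what changed: Fuses A's three list passes (translate to origin, scale, translate back) into one comprehension that computes each scaled point directly, with no helper calls or intermediate lists.
import Mathlib
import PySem

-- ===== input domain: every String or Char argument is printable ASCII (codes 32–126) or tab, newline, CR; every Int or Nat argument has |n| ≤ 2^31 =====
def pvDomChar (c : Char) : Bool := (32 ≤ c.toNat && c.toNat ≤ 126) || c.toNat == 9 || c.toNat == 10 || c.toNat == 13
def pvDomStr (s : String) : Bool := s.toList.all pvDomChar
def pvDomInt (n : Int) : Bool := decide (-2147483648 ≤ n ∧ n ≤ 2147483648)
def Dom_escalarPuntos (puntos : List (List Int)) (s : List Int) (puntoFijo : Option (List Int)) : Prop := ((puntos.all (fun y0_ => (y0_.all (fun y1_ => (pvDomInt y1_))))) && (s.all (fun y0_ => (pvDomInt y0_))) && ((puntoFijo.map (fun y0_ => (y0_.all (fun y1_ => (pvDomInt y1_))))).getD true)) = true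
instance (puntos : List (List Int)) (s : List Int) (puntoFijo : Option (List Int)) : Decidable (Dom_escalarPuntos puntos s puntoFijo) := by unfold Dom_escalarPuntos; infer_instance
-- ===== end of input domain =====

-- B fuses A's three passes (translate, scale, translate back) into one map; simpler, same cost.

-- ===== PORT A =====
-- punto[i] / s[i]: indices 0 and 1; out-of-range = IndexError, excluded by Pre_.
-- We use (pyGet? …).getD 0; exact on Pre_ where the index is in range.
def pvGet (xs : List Int) (i : Int) : Int := (PySem.List.pyGet? xs i).getD 0

def pvEscalarPunto (punto : List Int) (s : List Int) : List Int :=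
  [pvGet punto 0 * pvGet s 0, pvGet punto 1 * pvGet s 1]

def pvTrasladarPunto (punto : List Int) (t : List Int) : List Int :=
  [pvGet punto 0 + pvGet t 0, pvGet punto 1 + pvGet t 1]

def pvTrasladarPuntos (puntos : List (List Int)) (t : List Int) : List (List Int) :=
  puntos.map (fun punto => pvTrasladarPunto punto t)

def escalarPuntos (puntos : List (List Int)) (s : List Int) (puntoFijo : Option (List Int)) : List (List Int) :=
  match puntoFijo with
  | some pfj =>
      let pf := pfj.map (fun p => -1 * p)
      let puntos' := pvTrasladarPuntos puntos pf
      let ls := puntos'.map (fun punto => pvEscalarPunto punto s)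
      pvTrasladarPuntos ls pfj
  | none => puntos.map (fun punto => pvEscalarPunto punto s)

-- ===== PORT B =====
def escalarPuntos_alt (puntos : List (List Int)) (s : List Int) (puntoFijo : Option (List Int)) : List (List Int) :=
  match puntoFijo with
  | none => puntos.map (fun p => [pvGet p 0 * pvGet s 0, pvGet p 1 * pvGet s 1])
  | some pfj =>
      puntos.map (fun p =>
        [(pvGet p 0 + (-1 * pvGet pfj 0)) * pvGet s 0 + pvGet pfj 0,
         (pvGet p 1 + (-1 * pvGet pfj 1)) * pvGet s 1 + pvGet pfj 1])

-- ===== PRECONDITION & SPEC =====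
-- Pre_ excludes exactly the inputs where A (and B) raise IndexError: puntos nonempty with a point,
-- s, or the given puntoFijo shorter than 2.  On puntos = [] both return [] whatever the rest.
def Pre_escalarPuntos (puntos : List (List Int)) (s : List Int) (puntoFijo : Option (List Int)) : Prop :=
  puntos ≠ [] →
    (∀ p ∈ puntos, 2 ≤ p.length) ∧ 2 ≤ s.length ∧ 2 ≤ (puntoFijo.getD [0, 0]).length
instance (puntos : List (List Int)) (s : List Int) (puntoFijo : Option (List Int)) : Decidable (Pre_escalarPuntos puntos s puntoFijo) := by unfold Pre_escalarPuntos; infer_instance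

def pvWitness_escalarPuntos : List (List Int) × List Int × Option (List Int) :=
  ([[1, 2], [3, 4]], [2, 3], some [5, 6])

def Spec_escalarPuntos (puntos : List (List Int)) (s : List Int) (puntoFijo : Option (List Int)) (out : List (List Int)) : Prop := out = escalarPuntos_alt puntos s puntoFijo
instance (puntos : List (List Int)) (s : List Int) (puntoFijo : Option (List Int)) (out : List (List Int)) : Decidable (Spec_escalarPuntos puntos s puntoFijo out) := by unfold Spec_escalarPuntos; infer_instance

-- ===== CLAIM =====
def Claim_equal_escalarPuntos : Prop := ∀ (puntos : List (List Int)) (s : List Int) (puntoFijo : Option (List Int)), Dom_escalarPuntos puntos s puntoFijo → Pre_escalarPuntos puntos s puntoFijo → Spec_escalarPuntos puntos s puntoFijo (escalarPuntos puntos s puntoFijo)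

-- ===== LEMMAS AND PROOFS =====
theorem pvGet_map_neg (l : List Int) (i : Int) :
    pvGet (l.map fun p => -1 * p) i = -1 * pvGet l i := by
  simp only [pvGet, PySem.List.pyGet?, List.length_map, List.getElem?_map]
  cases PySem.List.pyIdx? l.length i with
  | none => simp
  | some k =>
      cases h : l[k]? <;> simp [h]

-- ===== VERDICT =====
theorem escalarPuntos_spec : Claim_equal_escalarPuntos := by
  intro puntos s puntoFijo _ _
  unfold Spec_escalarPuntos escalarPuntos escalarPuntos_alt
  cases puntoFijo with
  | none => rfl
  | some pfj =>
      simp only [pvTrasladarPuntos, List.map_map]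
      refine List.map_congr_left ?_
      intro p _
      simp only [Function.comp, pvEscalarPunto, pvTrasladarPunto, pvGet_map_neg]
      rfl
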